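-- pv_equiv track=rewrite | github.com/lichong0309/Distributed_algorithm_report | src/alg_FL.py | client_max
-- ===== SOURCE A (Python) =====
-- def client_max(client_matrix_data_list, operated_list, client_signal_matrix_list):
--     client_max_data_num = 0  # 初始化为0
--     client_max_data_index = 0 # 初始化为编号为0的client
--     for i in range(len(client_matrix_data_list)):
--         if client_signal_matrix_list[i] in operated_list:
--             pass
--         else:
--             # 初始化client_max_data_num为第一个不在operated_list中对应的数据和索引
--             client_max_data_num = client_matrix_data_list[i]
--             client_max_data_index = client_signal_matrix_list[i]
--             break
--
--     for i in range(len(client_matrix_data_list)):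
--         if client_matrix_data_list[i] > client_max_data_num:
--             if client_signal_matrix_list[i] in operated_list:          # 如果在operated_list中，则不做任何操作
--                 pass
--             else:
--                 client_max_data_num = client_matrix_data_list[i]
--                 client_max_data_index = client_signal_matrix_list[i]
--         else:
--             pass
--
--     return client_max_data_num, client_max_data_index
-- ===== SOURCE B (Python) =====
-- def client_max(client_matrix_data_list, operated_list, client_signal_matrix_list):
--     operated = set(operated_list)
--     ranked = sorted(
--         (p for p in zip(client_matrix_data_list, client_signal_matrix_list)
--          if p[1] not in operated),
--         key=lambda p: p[0], reverse=True)
--     # sort is stable, so ranked[0] is the FIRST pair with maximal data value,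
--     # exactly the pair A's strict-> scan keeps; (0, 0) when no candidate exists.
--     return ranked[0] if ranked else (0, 0)
-- ===== Notes on version B (the rewrite author's own statement) =====
-- stated objective: alternative
-- what changed: Replaces A's two index loops (a break-out initialisation scan plus a strict-max scan with a per-element list membership test) by sort-then-pick: the non-operated (data, signal) pairs are collected once against a set and stably sorted descending by data value, and the head of the sorted list is returned (stability reproduces A's first-occurrence tie-break, (0,0) is the empty default).
-- outside the precondition, e.g. on client_max([5, 3], [], [5]): A returns (5, 5), B returns (5, 5)
import Mathlib
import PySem

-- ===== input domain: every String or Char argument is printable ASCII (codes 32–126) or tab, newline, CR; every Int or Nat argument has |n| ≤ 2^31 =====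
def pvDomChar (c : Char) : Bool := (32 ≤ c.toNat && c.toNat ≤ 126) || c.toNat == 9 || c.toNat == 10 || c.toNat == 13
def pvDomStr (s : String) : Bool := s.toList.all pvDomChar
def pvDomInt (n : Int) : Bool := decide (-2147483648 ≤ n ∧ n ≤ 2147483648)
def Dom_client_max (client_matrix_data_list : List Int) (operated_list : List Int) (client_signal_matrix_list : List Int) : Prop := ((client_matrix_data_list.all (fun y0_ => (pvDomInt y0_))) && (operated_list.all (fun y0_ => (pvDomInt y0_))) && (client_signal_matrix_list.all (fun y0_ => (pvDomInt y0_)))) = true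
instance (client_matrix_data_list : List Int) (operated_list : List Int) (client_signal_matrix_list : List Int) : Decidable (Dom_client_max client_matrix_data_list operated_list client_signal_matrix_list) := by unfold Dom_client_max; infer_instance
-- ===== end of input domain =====

-- B replaces A's two index-and-membership loops by sort-then-pick: the candidate (data, signal)
-- pairs are stably sorted descending by data value and the head is returned ((0,0) if none).

-- ===== PORT A =====
-- first loop of A: scan until the first client whose signal is not operated (the `break`);
-- list indexing sig[i]/data[i] is ported as pyGetD with default 0, exact under Pre_ (all indices in range)
def clientMaxInit (data ops sig : List Int) (i : Nat) : Int × Int :=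
  if _h : i < data.length then
    if ops.contains (PySem.List.pyGetD sig (i : Int) 0) then
      clientMaxInit data ops sig (i + 1)
    else
      (PySem.List.pyGetD data (i : Int) 0, PySem.List.pyGetD sig (i : Int) 0)
  else (0, 0)
termination_by data.length - i

-- second loop of A: strict-max update, skipping operated signals
def clientMaxLoop (data ops sig : List Int) (i : Nat) (acc : Int × Int) : Int × Int :=
  if _h : i < data.length then
    clientMaxLoop data ops sig (i + 1)
      (if PySem.List.pyGetD data (i : Int) 0 > acc.1 then
        (if ops.contains (PySem.List.pyGetD sig (i : Int) 0) then acc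
         else (PySem.List.pyGetD data (i : Int) 0, PySem.List.pyGetD sig (i : Int) 0))
       else acc)
  else acc
termination_by data.length - i

def client_max (client_matrix_data_list : List Int) (operated_list : List Int) (client_signal_matrix_list : List Int) : Int × Int :=
  clientMaxLoop client_matrix_data_list operated_list client_signal_matrix_list 0
    (clientMaxInit client_matrix_data_list operated_list client_signal_matrix_list 0)

-- ===== PORT B =====
def client_max_alt (client_matrix_data_list : List Int) (operated_list : List Int) (client_signal_matrix_list : List Int) : Int × Int :=
  let operated := PySem.Set.ofList operated_list
  let ranked := PySem.List.sorted
    ((client_matrix_data_list.zip client_signal_matrix_list).filter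
      (fun p => !(PySem.Set.contains operated p.2)))
    (fun p => p.1) true
  match ranked with
  | [] => (0, 0)
  | p :: _ => p

-- ===== PRECONDITION & SPEC =====
-- Pre_ excludes inputs whose signal list is shorter than the data list: there A's indexing
-- client_signal_matrix_list[i] raises IndexError except when the data values happen to dodge
-- the second loop's access, so its value is an accident of the data; B zips (truncates) there.
def Pre_client_max (client_matrix_data_list : List Int) (operated_list : List Int) (client_signal_matrix_list : List Int) : Prop :=
  client_matrix_data_list.length ≤ client_signal_matrix_list.length
instance (client_matrix_data_list : List Int) (operated_list : List Int) (client_signal_matrix_list : List Int) : Decidable (Pre_client_max client_matrix_data_list operated_list client_signal_matrix_list) := by unfold Pre_client_max; infer_instance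

def pvWitness_client_max : List Int × List Int × List Int := ([3, 5, 2], [2], [1, 2, 3])

def Spec_client_max (client_matrix_data_list : List Int) (operated_list : List Int) (client_signal_matrix_list : List Int) (out : Int × Int) : Prop := out = client_max_alt client_matrix_data_list operated_list client_signal_matrix_list
instance (client_matrix_data_list : List Int) (operated_list : List Int) (client_signal_matrix_list : List Int) (out : Int × Int) : Decidable (Spec_client_max client_matrix_data_list operated_list client_signal_matrix_list out) := by unfold Spec_client_max; infer_instance

-- ===== CLAIM (what is proved, stated in full; the proofs are below) =====
def Claim_equal_client_max : Prop := ∀ (client_matrix_data_list : List Int) (operated_list : List Int) (client_signal_matrix_list : List Int), Dom_client_max client_matrix_data_list operated_list client_signal_matrix_list → Pre_client_max client_matrix_data_list operated_list client_signal_matrix_list → Spec_client_max client_matrix_data_list operated_list client_signal_matrix_list (client_max client_matrix_data_list operated_list client_signal_matrix_list)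

-- ===== LEMMAS AND PROOFS =====

-- the strict-max step A performs on a kept pair
def pvStep (m x : Int × Int) : Int × Int := if m.1 < x.1 then x else m

lemma pv_contains_ofList (ops : List Int) (x : Int) :
    PySem.Set.contains (PySem.Set.ofList ops) x = ops.contains x := by
  simp [PySem.Set.contains, PySem.Set.mem_ofList]

lemma pv_loop_eq (data ops sig : List Int) (hlen : data.length ≤ sig.length) :
    ∀ (k i : Nat) (acc : Int × Int), data.length - i ≤ k →
      clientMaxLoop data ops sig i acc =
        (((data.drop i).zip (sig.drop i)).filter (fun p => !(ops.contains p.2))).foldl pvStep acc := by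
  intro k
  induction k with
  | zero =>
    intro i acc h
    have hi : ¬ i < data.length := by omega
    rw [clientMaxLoop]
    simp [hi, List.drop_eq_nil_of_le (by omega : data.length ≤ i)]
  | succ k ih =>
    intro i acc h
    rw [clientMaxLoop]
    by_cases hi : i < data.length
    · have hsi : i < sig.length := lt_of_lt_of_le hi hlen
      have hd : data.drop i = data[i] :: data.drop (i + 1) := List.drop_eq_getElem_cons hi
      have hs : sig.drop i = sig[i] :: sig.drop (i + 1) := List.drop_eq_getElem_cons hsi
      have gd : PySem.List.pyGetD data (i : Int) 0 = data[i] := by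
        rw [PySem.List.pyGetD_natCast, List.getD_eq_getElem _ _ hi]
      have gs : PySem.List.pyGetD sig (i : Int) 0 = sig[i] := by
        rw [PySem.List.pyGetD_natCast, List.getD_eq_getElem _ _ hsi]
      rw [dif_pos hi, ih (i + 1) _ (by omega), hd, hs, gd, gs, List.zip_cons_cons,
        List.filter_cons]
      by_cases hc : sig[i] ∈ ops
      · simp [hc]
      · have hpred : (!ops.contains ((data[i], sig[i]) : Int × Int).2) = true := by
          simp [hc]
        rw [if_pos hpred, List.foldl_cons]
        congr 1
        simp [pvStep, GT.gt, hc]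
    · rw [dif_neg hi]
      simp [List.drop_eq_nil_of_le (by omega : data.length ≤ i)]

lemma pv_init_eq (data ops sig : List Int) (hlen : data.length ≤ sig.length) :
    ∀ (k i : Nat), data.length - i ≤ k →
      clientMaxInit data ops sig i =
        (match ((data.drop i).zip (sig.drop i)).filter (fun p => !(ops.contains p.2)) with
         | [] => ((0 : Int), (0 : Int))
         | p :: _ => p) := by
  intro k
  induction k with
  | zero =>
    intro i h
    have hi : ¬ i < data.length := by omega
    rw [clientMaxInit]
    simp [hi, List.drop_eq_nil_of_le (by omega : data.length ≤ i)]
  | succ k ih =>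
    intro i h
    rw [clientMaxInit]
    by_cases hi : i < data.length
    · have hsi : i < sig.length := lt_of_lt_of_le hi hlen
      have hd : data.drop i = data[i] :: data.drop (i + 1) := List.drop_eq_getElem_cons hi
      have hs : sig.drop i = sig[i] :: sig.drop (i + 1) := List.drop_eq_getElem_cons hsi
      have gd : PySem.List.pyGetD data (i : Int) 0 = data[i] := by
        rw [PySem.List.pyGetD_natCast, List.getD_eq_getElem _ _ hi]
      have gs : PySem.List.pyGetD sig (i : Int) 0 = sig[i] := by
        rw [PySem.List.pyGetD_natCast, List.getD_eq_getElem _ _ hsi]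
      rw [dif_pos hi, hd, hs, gd, gs, List.zip_cons_cons, List.filter_cons]
      by_cases hc : sig[i] ∈ ops
      · rw [ih (i + 1) (by omega)]
        simp [hc]
      · simp [hc]
    · rw [dif_neg hi]
      simp [List.drop_eq_nil_of_le (by omega : data.length ≤ i)]

-- inserting x into a nonempty accumulator of the reverse sort updates the head by pvStep;
-- folded over a list, the head of the stable descending insertion sort is the strict-max fold
lemma pv_foldl_insertBy_head (l : List (Int × Int)) :
    ∀ (h : Int × Int) (t : List (Int × Int)), ∃ t',
      l.foldl (fun acc x => PySem.List.insertBy (fun a b => decide ((b.1 : Int) < a.1)) x acc) (h :: t)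
        = (l.foldl pvStep h) :: t' := by
  induction l with
  | nil => intro h t; exact ⟨t, rfl⟩
  | cons x xs ih =>
    intro h t
    rw [List.foldl_cons, List.foldl_cons]
    by_cases hx : h.1 < x.1
    · have : PySem.List.insertBy (fun a b => decide ((b.1 : Int) < a.1)) x (h :: t)
          = x :: h :: t := by simp [PySem.List.insertBy, hx]
      rw [this, show pvStep h x = x from by simp [pvStep, hx]]
      exact ih x (h :: t)
    · have : PySem.List.insertBy (fun a b => decide ((b.1 : Int) < a.1)) x (h :: t)
          = h :: PySem.List.insertBy (fun a b => decide ((b.1 : Int) < a.1)) x t := by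
        simp [PySem.List.insertBy, hx]
      rw [this, show pvStep h x = h from by simp [pvStep, hx]]
      exact ih h _

lemma pv_sorted_head (c : Int × Int) (rest : List (Int × Int)) :
    ∃ t', PySem.List.sorted (c :: rest) (fun p => p.1) true = (rest.foldl pvStep c) :: t' := by
  rw [PySem.List.sorted_rev_eq_foldl_insertBy, List.foldl_cons]
  exact pv_foldl_insertBy_head rest c []

-- ===== VERDICT (by name: the statement is the Claim_ definition above) =====
theorem client_max_spec : Claim_equal_client_max := by
  intro data ops sig _dom hpre
  unfold Spec_client_max client_max client_max_alt
  have hlen : data.length ≤ sig.length := hpre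
  have hfilter :
      (data.zip sig).filter (fun p => !(PySem.Set.contains (PySem.Set.ofList ops) p.2)) =
        (data.zip sig).filter (fun p => !(ops.contains p.2)) := by
    apply List.filter_congr
    intro p _
    rw [pv_contains_ofList]
  rw [pv_loop_eq data ops sig hlen data.length 0 _ (by omega),
      pv_init_eq data ops sig hlen data.length 0 (by omega)]
  simp only [List.drop_zero, hfilter]
  cases hc : (data.zip sig).filter (fun p => !(ops.contains p.2)) with
  | nil => rfl
  | cons c rest =>
    obtain ⟨t', ht'⟩ := pv_sorted_head c rest
    rw [ht']
    show List.foldl pvStep (pvStep c c) rest = rest.foldl pvStep c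
    rw [show pvStep c c = c from by simp [pvStep]]
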